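-- pv_equiv track=rewrite | github.com/yosi-miller/w10--14-11-Kafka | producer/producer_repository.py | dangerous_sentences_checker
-- ===== SOURCE A (Python) =====
-- def dangerous_sentences_checker(email):
--     '''
--     :param email: dict of email information with the list sentences
--     :return: tuple of (mail, hostage_status, explos_status)
--     '''
--     # גישה לכל משפטי המייל
--     sentences = email['sentences']
--
--     # המילים המסוכנים
--     dangerous_words = ["hostage", "explos"]
--
--     # מיקום 1 כמות המילים המסוכנות מיקום 2 האינדקס של המשםט המסוכן
--     very_dangerous_sentence = [0, 0]
--
--     # סטסטוס האם נמצא המילה מסוכנת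
--     hostage_status = False
--     explos_status = False
--
--     for i, w in enumerate(sentences):
--         words = w.split(' ')
--         hostage = list(filter(lambda x: dangerous_words[0] in x, words))
--         explos = list(filter(lambda x: dangerous_words[1] in x, words))
--
--         # עדכון האם נמצא משפט עם יותר מילים מסוכנות
--         if (len(hostage) + len(explos)) > very_dangerous_sentence[0]:
--             very_dangerous_sentence = [len(hostage) + len(explos), i]
--
--         # עדכון סטאסטוס חטופים ותקיפות אם נמצא המילה
--         hostage_status = True if len(hostage) > 0 else hostage_status
--         explos_status = True if len(explos) > 0 else explos_status
--
--     # עדכון מיקום המשפט הכי מסוכן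
--     sentences[0], sentences[very_dangerous_sentence[1]] = sentences[very_dangerous_sentence[1]], sentences[0]
--     email['sentences'] = sentences
--
--     return email, hostage_status, explos_status
-- ===== SOURCE B (Python) =====
-- def dangerous_sentences_checker(email):
--     '''Different decomposition: build a per-sentence count table, then take
--     index of max; statuses via any(); same in-place swap and dict update.'''
--     sentences = email['sentences']
--     counts = [sum('hostage' in w for w in s.split(' ')) +
--               sum('explos' in w for w in s.split(' ')) for s in sentences]
--     hostage_status = any('hostage' in w for s in sentences for w in s.split(' '))
--     explos_status = any('explos' in w for s in sentences for w in s.split(' '))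
--     idx = counts.index(max(counts)) if counts else 0
--     sentences[0], sentences[idx] = sentences[idx], sentences[0]
--     email['sentences'] = sentences
--     return email, hostage_status, explos_status
-- ===== Notes on version B (the rewrite author's own statement) =====
-- stated objective: alternative
-- what changed: Replaces A's single interleaved loop carrying a [best,index] pair and two status flags by a separate per-sentence count table with counts.index(max(counts)) for the argmax (ties pick the earliest, matching A's strict '>') and any()-generators for the two status flags; the same in-place swap and dict update follow.
-- outside the precondition, e.g. on dangerous_sentences_checker({}): A raises KeyError, B raises KeyError; on dangerous_sentences_checker({'sentences': []}): A raises IndexError, B raises IndexError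
import Mathlib
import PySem

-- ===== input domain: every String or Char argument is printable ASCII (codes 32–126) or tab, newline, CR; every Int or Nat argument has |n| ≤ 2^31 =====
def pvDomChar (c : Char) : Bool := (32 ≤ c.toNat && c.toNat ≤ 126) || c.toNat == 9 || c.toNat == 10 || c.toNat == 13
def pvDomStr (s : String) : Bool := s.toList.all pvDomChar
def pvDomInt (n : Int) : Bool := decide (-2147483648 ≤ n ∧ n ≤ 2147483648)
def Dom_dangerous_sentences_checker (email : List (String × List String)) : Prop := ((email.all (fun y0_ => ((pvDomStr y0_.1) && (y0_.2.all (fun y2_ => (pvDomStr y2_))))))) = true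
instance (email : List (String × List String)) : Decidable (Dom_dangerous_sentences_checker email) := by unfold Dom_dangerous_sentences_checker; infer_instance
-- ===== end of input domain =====

-- B replaces A's interleaved single loop by a per-sentence count table (index of max)
-- plus any()-style status checks: a different decomposition of the same task ('alternative').
-- Both A and B mutate email['sentences'] in place the same way; equivalence is about the
-- returned value (which contains the updated dict).

-- ===== PORT A =====
-- loop body of A's 'for i, w in enumerate(sentences)' (state: ([best, idx], hostage_status, explos_status))
def pvBodyA (st : (Nat × Nat) × Bool × Bool) (wi : String × Nat) : (Nat × Nat) × Bool × Bool :=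
  let dangerous_words := ["hostage", "explos"]
  let words := (PySem.Str.split? wi.1 " ").getD []   -- w.split(' '); sep ≠ "" so split? = some
  let hostage := words.filter (fun x => PySem.Str.isIn (dangerous_words.getD 0 "") x)
  let explos := words.filter (fun x => PySem.Str.isIn (dangerous_words.getD 1 "") x)
  let vd := if hostage.length + explos.length > st.1.1 then (hostage.length + explos.length, wi.2) else st.1
  let hs := if hostage.length > 0 then true else st.2.1
  let es := if explos.length > 0 then true else st.2.2
  (vd, hs, es)

def dangerous_sentences_checker (email : List (String × List String)) : (List (String × List String)) × Bool × Bool :=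
  let sentences := PySem.Dict.getD (PySem.Dict.mk email) "sentences" ([] : List String)     -- email['sentences']; KeyError excluded by Pre_
  let st := sentences.zipIdx.foldl pvBodyA ((0, 0), false, false)
  match sentences with
  | [] => (email, st.2)                                     -- Python raises IndexError here; excluded by Pre_
  | s0 :: _ =>
    let sj := sentences.getD st.1.2 s0                      -- st.1.2 is always in range for nonempty sentences
    let sentences' := (sentences.set 0 sj).set st.1.2 s0    -- simultaneous swap
    ((PySem.Dict.insert (PySem.Dict.mk email) "sentences" sentences').items, st.2)

-- ===== PORT B =====
-- sum('hostage' in w for w in s.split(' ')) + sum('explos' in w for w in s.split(' ')) : a 0/1-sum is countP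
def pvCount (s : String) : Nat :=
  let ws := (PySem.Str.split? s " ").getD []
  ws.countP (fun w => PySem.Str.isIn "hostage" w) + ws.countP (fun w => PySem.Str.isIn "explos" w)

def dangerous_sentences_checker_alt (email : List (String × List String)) : (List (String × List String)) × Bool × Bool :=
  let sentences := PySem.Dict.getD (PySem.Dict.mk email) "sentences" ([] : List String)
  let counts := sentences.map pvCount
  let hostage_status := sentences.any (fun s => ((PySem.Str.split? s " ").getD []).any (fun w => PySem.Str.isIn "hostage" w))
  let explos_status := sentences.any (fun s => ((PySem.Str.split? s " ").getD []).any (fun w => PySem.Str.isIn "explos" w))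
  let idx := match PySem.List.max? counts (fun x => x) with  -- max(counts) (guarded: 0 if empty)
    | none => 0
    | some m => (PySem.List.index? counts m).getD 0          -- counts.index(max(counts))
  match sentences with
  | [] => (email, hostage_status, explos_status)             -- Source B raises IndexError at the swap; excluded by Pre_
  | s0 :: _ =>
    let sj := sentences.getD idx s0
    ((PySem.Dict.insert (PySem.Dict.mk email) "sentences" ((sentences.set 0 sj).set idx s0)).items, hostage_status, explos_status)

-- ===== PRECONDITION & SPEC =====
-- Pre_ excludes exactly the inputs where A raises: a missing 'sentences' key (KeyError) and
-- an empty sentences list (IndexError at the swap).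
def Pre_dangerous_sentences_checker (email : List (String × List String)) : Prop :=
  PySem.Dict.getD (PySem.Dict.mk email) "sentences" ([] : List String) ≠ []
instance (email : List (String × List String)) : Decidable (Pre_dangerous_sentences_checker email) := by
  unfold Pre_dangerous_sentences_checker; infer_instance

def pvWitness_dangerous_sentences_checker : (List (String × List String)) :=
  [("sentences", ["the hostage is here", "all clear"])]

def Spec_dangerous_sentences_checker (email : List (String × List String)) (out : (List (String × List String)) × Bool × Bool) : Prop := out = dangerous_sentences_checker_alt email
instance (email : List (String × List String)) (out : (List (String × List String)) × Bool × Bool) : Decidable (Spec_dangerous_sentences_checker email out) := by unfold Spec_dangerous_sentences_checker; infer_instance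

-- ===== CLAIM (what is proved, stated in full; the proofs are below) =====
def Claim_equal_dangerous_sentences_checker : Prop := ∀ (email : List (String × List String)), Dom_dangerous_sentences_checker email → Pre_dangerous_sentences_checker email → Spec_dangerous_sentences_checker email (dangerous_sentences_checker email)

-- ===== LEMMAS AND PROOFS =====

-- recursive description of A's running argmax (strict '>', so first maximum wins)
def pvArgmax : List Nat → Nat → Nat → Nat → Nat × Nat
  | [], b, bi, _ => (b, bi)
  | c :: cs, b, bi, i => if c > b then pvArgmax cs c i (i + 1) else pvArgmax cs b bi (i + 1)

-- A's per-sentence count equals B's pvCount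
lemma pvCountA_eq (s : String) :
    (((PySem.Str.split? s " ").getD []).filter (fun x => PySem.Str.isIn "hostage" x)).length
      + (((PySem.Str.split? s " ").getD []).filter (fun x => PySem.Str.isIn "explos" x)).length
    = pvCount s := by
  simp [pvCount, List.countP_eq_length_filter]

lemma decide_exists_or {α : Type} (l : List α) (p : α → Bool) (h : Bool) :
    (decide (∃ x ∈ l, p x = true) || h) = (h || l.any p) := by
  have hd : decide (∃ x ∈ l, p x = true) = l.any p := by
    cases hx : l.any p
    · exact decide_eq_false (fun ⟨x, hx', hp⟩ => absurd hp (by simp [List.any_eq_false.mp hx x hx']))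
    · exact decide_eq_true (List.any_eq_true.mp hx)
  rw [hd, Bool.or_comm]

-- the combined fold splits into argmax + two any's
lemma foldA_main (sents : List String) : ∀ (b bi i : Nat) (h e : Bool),
    (sents.zipIdx i).foldl pvBodyA ((b, bi), h, e)
      = (pvArgmax (sents.map pvCount) b bi i,
         h || sents.any (fun s => ((PySem.Str.split? s " ").getD []).any (fun w => PySem.Str.isIn "hostage" w)),
         e || sents.any (fun s => ((PySem.Str.split? s " ").getD []).any (fun w => PySem.Str.isIn "explos" w))) := by
  induction sents with
  | nil => intro b bi i h e; simp [pvArgmax]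
  | cons s t ih =>
    intro b bi i h e
    rw [List.zipIdx_cons, List.foldl_cons]
    show (t.zipIdx (i+1)).foldl pvBodyA (pvBodyA ((b, bi), h, e) (s, i)) = _
    have hb : pvBodyA ((b, bi), h, e) (s, i)
        = ((if pvCount s > b then (pvCount s, i) else (b, bi)),
           h || ((PySem.Str.split? s " ").getD []).any (fun w => PySem.Str.isIn "hostage" w),
           e || ((PySem.Str.split? s " ").getD []).any (fun w => PySem.Str.isIn "explos" w)) := by
      simp only [pvBodyA, List.getD]
      rw [← pvCountA_eq s]
      simp
      exact ⟨decide_exists_or _ _ _, decide_exists_or _ _ _⟩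
    rw [hb]
    by_cases hc : pvCount s > b
    · rw [if_pos hc, ih (pvCount s) i (i+1)]
      simp only [List.map_cons, List.any_cons, Bool.or_assoc, pvArgmax, if_pos hc]
    · rw [if_neg hc, ih b bi (i+1)]
      simp only [List.map_cons, List.any_cons, Bool.or_assoc, pvArgmax, if_neg hc]

lemma foldl_max_mem (cs : List Nat) : ∀ b : Nat, cs.foldl max b = b ∨ cs.foldl max b ∈ cs := by
  induction cs with
  | nil => intro b; simp
  | cons c t ih =>
    intro b
    rw [List.foldl_cons]
    rcases ih (max b c) with h | h
    · rcases max_choice b c with hm | hm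
      · rw [hm] at h ⊢
        exact Or.inl h
      · rw [hm] at h ⊢
        right
        rw [h]
        exact List.mem_cons_self
    · exact Or.inr (List.mem_cons_of_mem _ h)

lemma pvArgmax_eq (cs : List Nat) : ∀ (b bi i : Nat),
    pvArgmax cs b bi i
      = if ∀ x ∈ cs, x ≤ b then (b, bi)
        else (cs.foldl max b, i + cs.idxOf (cs.foldl max b)) := by
  induction cs with
  | nil => intro b bi i; simp [pvArgmax]
  | cons c t ih =>
    intro b bi i
    by_cases hc : c > b
    · have hall : ¬ (∀ x ∈ c :: t, x ≤ b) := by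
        push Not; exact ⟨c, List.mem_cons_self, by omega⟩
      rw [if_neg hall]
      have hM : (c :: t).foldl max b = t.foldl max c := by
        simp [List.foldl_cons, Nat.max_eq_right (le_of_lt hc)]
      simp only [pvArgmax, if_pos hc]
      rw [ih c i (i+1), hM]
      by_cases ht : ∀ x ∈ t, x ≤ c
      · rw [if_pos ht]
        have hfc : t.foldl max c = c := by
          rcases foldl_max_mem t c with h | h
          · exact h
          · exact le_antisymm ((ht _ h)) (PySem.List.le_foldl_max t c).1
        rw [hfc]
        simp [List.idxOf_cons_self]
      · rw [if_neg ht]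
        have hlt : c < t.foldl max c := by
          push Not at ht
          rcases ht with ⟨x, hx, hxc⟩
          exact lt_of_lt_of_le hxc ((PySem.List.le_foldl_max t c).2 x hx)
        have hne : c ≠ t.foldl max c := by omega
        rw [List.idxOf_cons_ne _ (by simpa using hne)]
        simp; omega
    · have hbc : max b c = b := Nat.max_eq_left (by omega)
      have hM : (c :: t).foldl max b = t.foldl max b := by simp [List.foldl_cons, hbc]
      simp only [pvArgmax, if_neg hc]
      rw [ih b bi (i+1), hM]
      by_cases ht : ∀ x ∈ t, x ≤ b
      · have hall : ∀ x ∈ c :: t, x ≤ b := by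
          intro x hx; rcases List.mem_cons.mp hx with h | h
          · omega
          · exact ht x h
        rw [if_pos ht, if_pos hall]
      · have hall : ¬ (∀ x ∈ c :: t, x ≤ b) := by
          intro hcontra; exact ht (fun x hx => hcontra x (List.mem_cons_of_mem _ hx))
        rw [if_neg ht, if_neg hall]
        have hlt : b < t.foldl max b := by
          push Not at ht
          rcases ht with ⟨x, hx, hxb⟩
          exact lt_of_lt_of_le hxb ((PySem.List.le_foldl_max t b).2 x hx)
        have hne : c ≠ t.foldl max b := by omega
        rw [List.idxOf_cons_ne _ (by simpa using hne)]
        simp; omega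

-- A's selected index equals B's counts.index(max(counts)) on a nonempty counts list
lemma idx_eq (c0 : Nat) (rest : List Nat) :
    (pvArgmax (c0 :: rest) 0 0 0).2
      = (PySem.List.index? (c0 :: rest) (rest.foldl max c0)).getD 0 := by
  have hM : (c0 :: rest).foldl max 0 = rest.foldl max c0 := by
    simp [List.foldl_cons]
  rw [pvArgmax_eq]
  by_cases hall : ∀ x ∈ c0 :: rest, x ≤ 0
  · have hc0 : c0 = 0 := Nat.le_zero.mp (hall c0 List.mem_cons_self)
    have hm0 : rest.foldl max c0 = 0 := by
      rcases foldl_max_mem rest c0 with h | h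
      · omega
      · have := hall _ (List.mem_cons_of_mem _ h); omega
    rw [if_pos hall, hm0, hc0, PySem.List.index?_cons_self]
    rfl
  · rw [if_neg hall, hM]
    have hmem : rest.foldl max c0 ∈ c0 :: rest := by
      rcases foldl_max_mem rest c0 with h | h
      · rw [h]; exact List.mem_cons_self
      · exact List.mem_cons_of_mem _ h
    have hk : ∃ k, List.idxOf? (rest.foldl max c0) (c0 :: rest) = some k := by
      rcases ho : List.idxOf? (rest.foldl max c0) (c0 :: rest) with _ | k
      · exact absurd hmem (List.idxOf?_eq_none_iff.mp ho)
      · exact ⟨k, rfl⟩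
    rcases hk with ⟨k, hk⟩
    rw [PySem.List.index?_eq_idxOf?, hk]
    have := List.idxOf_eq_getD_idxOf? (rest.foldl max c0) (c0 :: rest)
    rw [hk] at this
    simp [this]

-- ===== VERDICT (by name: the statement is the Claim_ definition above) =====
theorem dangerous_sentences_checker_spec : Claim_equal_dangerous_sentences_checker := by
  intro email _ hpre
  unfold Spec_dangerous_sentences_checker
  unfold dangerous_sentences_checker dangerous_sentences_checker_alt
  unfold Pre_dangerous_sentences_checker at hpre
  cases hsent : PySem.Dict.getD (PySem.Dict.mk email) "sentences" ([] : List String) with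
  | nil => exact absurd hsent hpre
  | cons s0 rest =>
    simp only []
    rw [foldA_main (s0 :: rest) 0 0 0 false false]
    simp only [Bool.false_or, List.map_cons]
    rw [PySem.List.max?_id_cons]
    rw [idx_eq (pvCount s0) (rest.map pvCount)]
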